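-- pv_equiv track=rewrite | github.com/texttest/capturemock | capturemock/traffic.py | findQuote
-- ===== SOURCE A (Python) =====
-- def findQuote(out):
--     bestPos, bestQuoteChar = None, None
--     for quoteChar in "'\"":
--         pos = out.find(quoteChar, 0, 2)
--         if pos != -1 and (bestPos is None or pos < bestPos):
--             bestPos = pos
--             bestQuoteChar = quoteChar
--     return bestPos, bestQuoteChar
-- ===== SOURCE B (Python) =====
-- def findQuote(out):
--     for pos, ch in enumerate(out[:2]):
--         if ch in ("'", '"'):
--             return pos, ch
--     return None, None
-- ===== Notes on version B (the rewrite author's own statement) =====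
-- stated objective: simpler
-- what changed: B replaces A's two find(quoteChar, 0, 2) scans with min-position bookkeeping by a single left-to-right scan of the first two characters that returns immediately at the first quote character.
import Mathlib
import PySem

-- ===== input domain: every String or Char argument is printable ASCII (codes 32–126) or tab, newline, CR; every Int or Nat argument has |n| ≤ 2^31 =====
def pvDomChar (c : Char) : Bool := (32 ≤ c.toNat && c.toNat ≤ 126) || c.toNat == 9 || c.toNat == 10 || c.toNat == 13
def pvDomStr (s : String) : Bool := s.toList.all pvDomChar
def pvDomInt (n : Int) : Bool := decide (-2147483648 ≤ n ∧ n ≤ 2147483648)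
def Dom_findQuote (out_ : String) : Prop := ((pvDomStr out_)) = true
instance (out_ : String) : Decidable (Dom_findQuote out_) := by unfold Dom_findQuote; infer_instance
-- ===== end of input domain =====

-- B replaces A's per-quote-character find(…, 0, 2) scans and min-position bookkeeping by a single
-- left-to-right scan of the two-character window that returns at the first quote character (objective: simpler).

-- ===== PORT A =====
-- for quoteChar in "'\"": pos = out.find(quoteChar, 0, 2); if pos != -1 and (bestPos is None or pos < bestPos): update
def findQuote (out_ : String) : Option Int × Option String :=
  List.foldl
    (fun best quoteChar =>
      let pos := PySem.Str.findFrom out_ (String.ofList [quoteChar]) 0 (some 2)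
      if pos != -1 && (match best.1 with
                       | none => true
                       | some bestPos => decide (pos < bestPos))
      then (some pos, some (String.ofList [quoteChar]))
      else best)
    (none, none) ['\'', '"']

-- ===== PORT B =====
-- for pos, ch in enumerate(out[:2]): if ch in ("'", '"'): return pos, ch;  then return None, None
def fqScan : List Char → Int → Option Int × Option String
  | [], _ => (none, none)
  | ch :: rest, pos =>
      if ch = '\'' ∨ ch = '"' then (some pos, some (String.ofList [ch]))
      else fqScan rest (pos + 1)

def findQuote_alt (out_ : String) : Option Int × Option String :=
  fqScan (PySem.Str.slice out_ none (some 2)).toList 0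

-- ===== PRECONDITION & SPEC =====
def Spec_findQuote (out_ : String) (out : Option Int × Option String) : Prop := out = findQuote_alt out_
instance (out_ : String) (out : Option Int × Option String) : Decidable (Spec_findQuote out_ out) := by unfold Spec_findQuote; infer_instance

-- ===== CLAIM (what is proved, stated in full; the proofs are below) =====
def Claim_equal_findQuote : Prop := ∀ (out_ : String), Dom_findQuote out_ → Spec_findQuote out_ (findQuote out_)

-- ===== LEMMAS AND PROOFS =====

-- Chars.find on the tiny explicit windows (length 0/1/2) as closed if-expressions
theorem fq_find0 (q : Char) : PySem.Chars.find [] [q] = -1 := by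
  simp only [PySem.Chars.find]; rw [PySem.Chars.find.go]; simp

theorem fq_find1 (a q : Char) : PySem.Chars.find [a] [q] = if a = q then 0 else -1 := by
  simp only [PySem.Chars.find]
  rw [PySem.Chars.find.go, PySem.Chars.find.go]
  simp only [List.isPrefixOf, Bool.and_true, List.isEmpty]
  split_ifs <;> simp only [beq_iff_eq] at * <;> first | rfl | tauto

theorem fq_find2 (a b q : Char) :
    PySem.Chars.find [a, b] [q] = if a = q then 0 else if b = q then 1 else -1 := by
  simp only [PySem.Chars.find]
  rw [PySem.Chars.find.go, PySem.Chars.find.go, PySem.Chars.find.go]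
  simp only [List.isPrefixOf, Bool.and_true, List.isEmpty]
  split_ifs <;> simp only [beq_iff_eq] at * <;> first | rfl | tauto

-- s.find(sub, 0, 2) is a plain find in the first-two-characters window
theorem fq_findFrom_two (cs : List Char) (qc : Char) :
    PySem.Chars.findFrom cs [qc] 0 (some 2) = PySem.Chars.find (cs.take 2) [qc] := by
  cases cs with
  | nil => simp [PySem.Chars.findFrom, fq_find0]
  | cons a cs' =>
    cases cs' with
    | nil => simp [PySem.Chars.findFrom]; intro h; omega
    | cons b t =>
      have h : ¬ ((t.length : Int) < 0) := by omega
      simp only [PySem.Chars.findFrom, List.take_succ_cons, List.take_zero]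
      norm_num [h]
      rw [show List.take (Int.toNat 2) (a :: b :: t) = [a, b] from rfl]
      split_ifs with hr <;> omega

-- out[:2] is the two-character prefix
theorem fq_slice_two (s : String) :
    (PySem.Str.slice s none (some 2)).toList = s.toList.take 2 := by
  simp [pysem, PySem.List.slice]

-- ===== VERDICT (by name: the statement is the Claim_ definition above) =====
theorem findQuote_spec : Claim_equal_findQuote := by
  intro out_ _
  unfold Spec_findQuote findQuote findQuote_alt
  rw [fq_slice_two]
  simp only [List.foldl, PySem.Str.findFrom_eq,
    show (String.ofList ['\'']).toList = ['\''] from rfl,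
    show (String.ofList ['"']).toList = ['"'] from rfl,
    fq_findFrom_two]
  rcases hx : out_.toList.take 2 with _ | ⟨a, _ | ⟨b, t⟩⟩
  · simp [fq_find0, fqScan]
  · by_cases h1 : a = '\'' <;> by_cases h2 : a = '"' <;>
      simp_all [fq_find1, fqScan]
  · have ht : t = [] := by
      have := List.length_take_le 2 out_.toList
      rw [hx] at this; simpa using this
    subst ht
    by_cases h1 : a = '\'' <;> by_cases h2 : a = '"' <;>
      by_cases h3 : b = '\'' <;> by_cases h4 : b = '"' <;>
      simp_all [fq_find2, fqScan]
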